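-- pv_equiv track=rewrite | github.com/gmelo80/chessProjectPrototype | chess_copy3.py | rowAsStr
-- ===== SOURCE A (Python) =====
-- def rowAsStr(boardRow):
--     rowStr = ""
--     spaceCount = 0
--     for val in boardRow:
--         if val == " ":
--             spaceCount += 1
--         else:
--             if spaceCount > 0:
--                 rowStr = rowStr+ str(spaceCount) + val
--             else:
--                 rowStr = rowStr + val
--             spaceCount=0
--     if spaceCount > 0:
--         rowStr = rowStr + str(spaceCount)
--
--     return rowStr
-- ===== SOURCE B (Python) =====
-- def rowAsStr(boardRow):
--     # Two-pointer run-grouping: for each maximal run of spaces emit its length,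
--     # emit every other cell verbatim, and join the pieces once at the end.
--     pieces = []
--     i = 0
--     n = len(boardRow)
--     while i < n:
--         if boardRow[i] == " ":
--             j = i
--             while j < n and boardRow[j] == " ":
--                 j += 1
--             pieces.append(str(j - i))
--             i = j
--         else:
--             pieces.append(boardRow[i])
--             i += 1
--     return "".join(pieces)
-- ===== Notes on version B (the rewrite author's own statement) =====
-- stated objective: alternative
-- what changed: Replaces A's running spaceCount state machine with repeated string concatenation by explicit two-pointer run-grouping: an inner scan finds the end of each maximal space run, pieces (run lengths / cells verbatim) are collected in a list and joined once at the end.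
import Mathlib
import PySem

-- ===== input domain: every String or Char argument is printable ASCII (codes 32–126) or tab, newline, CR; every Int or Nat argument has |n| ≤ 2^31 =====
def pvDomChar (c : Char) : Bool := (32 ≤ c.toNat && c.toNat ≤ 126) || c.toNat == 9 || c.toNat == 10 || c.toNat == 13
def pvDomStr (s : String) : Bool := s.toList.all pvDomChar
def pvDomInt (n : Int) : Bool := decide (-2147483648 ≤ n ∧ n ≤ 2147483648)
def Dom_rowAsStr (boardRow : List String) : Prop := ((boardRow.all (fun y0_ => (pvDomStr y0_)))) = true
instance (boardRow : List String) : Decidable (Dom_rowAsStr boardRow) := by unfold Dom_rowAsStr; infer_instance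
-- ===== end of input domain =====

-- B replaces A's running spaceCount state machine (repeated string concatenation)
-- with explicit run-grouping: emit pieces per maximal run, join once at the end.


-- ===== PORT A =====
-- state (rowStr, spaceCount); the final 'if spaceCount > 0' flushes the pending run
def rowAsStr (boardRow : List String) : String :=
  let st := boardRow.foldl
    (fun (st : String × Int) val =>
      if val = " " then (st.1, st.2 + 1)
      else ((if st.2 > 0 then st.1 ++ PySem.Int.toStr st.2 ++ val else st.1 ++ val), 0))
    ("", 0)
  if st.2 > 0 then st.1 ++ PySem.Int.toStr st.2 else st.1

-- ===== PORT B =====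
-- inner 'while j < n and boardRow[j] == " "' of Source B: first index >= j past the space run
def pvRunEnd (bs : List String) (j : Nat) : Nat :=
  if h : j < bs.length then (if bs[j] = " " then pvRunEnd bs (j + 1) else j) else j
termination_by bs.length - j

theorem pvRunEnd_ge (bs : List String) (j : Nat) : j <= pvRunEnd bs j := by
  rw [pvRunEnd]
  split
  · split
    · have := pvRunEnd_ge bs (j + 1); omega
    · exact le_rfl
  · exact le_rfl
termination_by bs.length - j

-- outer 'while i < n' of Source B, accumulating the pieces list
def pvPiecesFrom (bs : List String) (i : Nat) : List String :=
  if h : i < bs.length then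
    if bs[i] = " " then
      PySem.Int.toStr ((pvRunEnd bs i - i : Nat) : Int) :: pvPiecesFrom bs (pvRunEnd bs i)
    else bs[i] :: pvPiecesFrom bs (i + 1)
  else []
termination_by bs.length - i
decreasing_by
  · have h1 : i + 1 <= pvRunEnd bs i := by
      rw [pvRunEnd]; simp only [h, dif_pos]; rw [if_pos (by assumption)]
      exact pvRunEnd_ge bs (i + 1)
    omega
  · omega

def rowAsStr_alt (boardRow : List String) : String :=
  PySem.Str.join "" (pvPiecesFrom boardRow 0)

-- ===== PRECONDITION & SPEC =====
def Spec_rowAsStr (boardRow : List String) (out : String) : Prop := out = rowAsStr_alt boardRow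
instance (boardRow : List String) (out : String) : Decidable (Spec_rowAsStr boardRow out) := by unfold Spec_rowAsStr; infer_instance

-- ===== CLAIM (what is proved, stated in full; the proofs are below) =====
def Claim_equal_rowAsStr : Prop := ∀ (boardRow : List String), Dom_rowAsStr boardRow → Spec_rowAsStr boardRow (rowAsStr boardRow)

-- ===== LEMMAS AND PROOFS =====

-- proof-side recursion view of Source B's scan, on list suffixes
def pvSpaceRun : List String → Nat × List String
  | [] => (0, [])
  | x :: xs => if x = " " then ((pvSpaceRun xs).1 + 1, (pvSpaceRun xs).2) else (0, x :: xs)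

theorem pvSpaceRun_length_le : ∀ l : List String, (pvSpaceRun l).2.length <= l.length := by
  intro l
  induction l with
  | nil => simp [pvSpaceRun]
  | cons x xs ih =>
    by_cases h : x = " "
    · simp [pvSpaceRun, h]; omega
    · simp [pvSpaceRun, h]

def pvPieces : List String → List String
  | [] => []
  | x :: xs =>
    if x = " " then
      PySem.Int.toStr (((pvSpaceRun xs).1 + 1 : Nat) : Int) :: pvPieces (pvSpaceRun xs).2
    else
      x :: pvPieces xs
termination_by l => l.length
decreasing_by
  · have := pvSpaceRun_length_le xs; simpa using Nat.lt_succ_of_le this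
  · simp

theorem pvRunEnd_le (bs : List String) (j : Nat) : pvRunEnd bs j <= max bs.length j := by
  rw [pvRunEnd]
  split
  · split
    · have := pvRunEnd_le bs (j + 1); omega
    · omega
  · omega
termination_by bs.length - j

-- Source B's index scan equals the suffix recursion
theorem pvSpaceRun_drop (bs : List String) (i : Nat) :
    pvSpaceRun (bs.drop i) = (pvRunEnd bs i - i, bs.drop (pvRunEnd bs i)) := by
  by_cases h : i < bs.length
  · rw [List.drop_eq_getElem_cons h]
    by_cases hx : bs[i] = " "
    · have hre : pvRunEnd bs i = pvRunEnd bs (i + 1) := by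
        rw [pvRunEnd]; simp only [h, dif_pos]; rw [if_pos hx]
      rw [pvSpaceRun, if_pos hx, pvSpaceRun_drop bs (i + 1), hre]
      have := pvRunEnd_ge bs (i + 1)
      simp only [Prod.mk.injEq]
      exact ⟨by omega, trivial⟩
    · have hre : pvRunEnd bs i = i := by
        rw [pvRunEnd]; simp only [h, dif_pos]; rw [if_neg hx]
      rw [pvSpaceRun, if_neg hx, hre, ← List.drop_eq_getElem_cons h]
      simp
  · have hd : bs.drop i = [] := List.drop_eq_nil_of_le (by omega)
    have hre : pvRunEnd bs i = i := by rw [pvRunEnd]; simp only [h, dif_neg, not_false_iff]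
    simp [hd, hre, pvSpaceRun]
termination_by bs.length - i

theorem pvPiecesFrom_eq_pieces (bs : List String) (i : Nat) :
    pvPiecesFrom bs i = pvPieces (bs.drop i) := by
  by_cases h : i < bs.length
  · rw [pvPiecesFrom]
    simp only [h, dif_pos]
    rw [List.drop_eq_getElem_cons h]
    by_cases hx : bs[i] = " "
    · have hge : i + 1 <= pvRunEnd bs i := by
        rw [pvRunEnd]; simp only [h, dif_pos]; rw [if_pos hx]
        exact pvRunEnd_ge bs (i + 1)
      have hsr := pvSpaceRun_drop bs (i + 1)
      have hre : pvRunEnd bs i = pvRunEnd bs (i + 1) := by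
        rw [pvRunEnd]; simp only [h, dif_pos]; rw [if_pos hx]
      have h2 := pvRunEnd_ge bs (i + 1)
      rw [if_pos hx, pvPieces, if_pos hx,
        pvPiecesFrom_eq_pieces bs (pvRunEnd bs i), hre, hsr]
      simp only [List.cons.injEq]
      exact ⟨by congr 1; omega, trivial⟩
    · rw [if_neg hx, pvPieces, if_neg hx, pvPiecesFrom_eq_pieces bs (i + 1)]
  · have hd : bs.drop i = [] := List.drop_eq_nil_of_le (by omega)
    rw [pvPiecesFrom]
    simp [h, hd, pvPieces]
termination_by bs.length - i
decreasing_by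
  · have _h3 := pvRunEnd_le bs i
    omega
  · omega

-- names for A's loop body and final flush (definitionally equal to rowAsStr's lambda)
def pvStep (st : String × Int) (val : String) : String × Int :=
  if val = " " then (st.1, st.2 + 1)
  else ((if st.2 > 0 then st.1 ++ PySem.Int.toStr st.2 ++ val else st.1 ++ val), 0)

def pvFinish (st : String × Int) : String :=
  if st.2 > 0 then st.1 ++ PySem.Int.toStr st.2 else st.1

theorem rowAsStr_eq_fold (l : List String) :
    rowAsStr l = pvFinish (l.foldl pvStep ("", 0)) := rfl

-- midpoint: the tail of the output (as chars) given a pending space count c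
def pvMid : Nat → List String → List Char
  | c, [] => if 0 < c then PySem.Int.toChars (c : Int) else []
  | c, x :: xs =>
    if x = " " then pvMid (c + 1) xs
    else (if 0 < c then PySem.Int.toChars (c : Int) ++ x.toList else x.toList) ++ pvMid 0 xs

theorem pvMid_flush : ∀ (l : List String) (c : Nat), 0 < c →
    pvMid c l = PySem.Int.toChars ((c + (pvSpaceRun l).1 : Nat) : Int) ++ pvMid 0 (pvSpaceRun l).2 := by
  intro l
  induction l with
  | nil => intro c hc; simp [pvMid, pvSpaceRun, hc]
  | cons x xs ih =>
    intro c hc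
    by_cases h : x = " "
    · rw [pvMid, if_pos h, ih (c + 1) (by omega)]
      have hs : pvSpaceRun (x :: xs) = ((pvSpaceRun xs).1 + 1, (pvSpaceRun xs).2) := by
        rw [pvSpaceRun, if_pos h]
      rw [hs]
      congr 2
      omega
    · have hs : pvSpaceRun (x :: xs) = (0, x :: xs) := by rw [pvSpaceRun, if_neg h]
      have h2 : pvMid 0 (x :: xs) = x.toList ++ pvMid 0 xs := by
        rw [pvMid, if_neg h]; simp
      rw [pvMid, if_neg h, if_pos hc, hs, h2, List.append_assoc]
      simp

theorem join_nil_cons (p : List Char) (parts : List (List Char)) :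
    PySem.Chars.join [] (p :: parts) = p ++ PySem.Chars.join [] parts := by
  cases parts
  · simp [PySem.Chars.join_singleton, PySem.Chars.join_nil]
  · rw [PySem.Chars.join_cons_cons]; simp

theorem pieces_join_eq_mid : ∀ l : List String,
    PySem.Chars.join [] ((pvPieces l).map String.toList) = pvMid 0 l := by
  suffices H : ∀ (n : Nat) (l : List String), l.length ≤ n →
      PySem.Chars.join [] ((pvPieces l).map String.toList) = pvMid 0 l by
    exact fun l => H l.length l le_rfl
  intro n
  induction n with
  | zero =>
    intro l hl
    have : l = [] := by cases l <;> simp_all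
    subst this
    simp [pvPieces, pvMid, PySem.Chars.join_nil]
  | succ n ih =>
    intro l hl
    match l with
    | [] => simp [pvPieces, pvMid, PySem.Chars.join_nil]
    | x :: xs =>
      by_cases h : x = " "
      · rw [pvPieces, if_pos h, List.map_cons, join_nil_cons,
          ih (pvSpaceRun xs).2 (by have := pvSpaceRun_length_le xs; simp at hl; omega),
          pvMid, if_pos h, pvMid_flush xs 1 (by omega), PySem.Int.toList_toStr]
        congr 2
        omega
      · rw [pvPieces, if_neg h, List.map_cons, join_nil_cons,
          ih xs (by simp at hl; omega), pvMid, if_neg h]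
        simp

theorem fold_eq_mid : ∀ (l : List String) (acc : String) (c : Nat),
    (pvFinish (l.foldl pvStep (acc, (c : Int)))).toList = acc.toList ++ pvMid c l := by
  intro l
  induction l with
  | nil =>
    intro acc c
    by_cases hc : 0 < c
    · have : ((c : Int) > 0) := by exact_mod_cast hc
      simp [pvFinish, pvMid, hc, PySem.Int.toList_toStr]
    · have hc0 : c = 0 := by omega
      subst hc0
      simp [pvFinish, pvMid]
  | cons x xs ih =>
    intro acc c
    rw [List.foldl_cons]
    by_cases h : x = " "
    · have hs : pvStep (acc, (c : Int)) x = (acc, ((c + 1 : Nat) : Int)) := by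
        rw [pvStep, if_pos h]; push_cast; ring_nf
      rw [hs, ih acc (c + 1), pvMid, if_pos h]
    · by_cases hc : 0 < c
      · have hcz : ((c : Int) > 0) := by exact_mod_cast hc
        have hs : pvStep (acc, (c : Int)) x = (acc ++ PySem.Int.toStr (c : Int) ++ x, ((0 : Nat) : Int)) := by
          rw [pvStep, if_neg h, if_pos hcz]; simp
        rw [hs, ih (acc ++ PySem.Int.toStr (c : Int) ++ x) 0, pvMid, if_neg h, if_pos hc]
        simp [PySem.Int.toList_toStr]
      · have hc0 : c = 0 := by omega
        subst hc0
        have hs : pvStep (acc, ((0 : Nat) : Int)) x = (acc ++ x, ((0 : Nat) : Int)) := by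
          rw [pvStep, if_neg h]; simp
        rw [hs, ih (acc ++ x) 0, pvMid, if_neg h]
        simp

-- ===== VERDICT (by name: the statement is the Claim_ definition above) =====
theorem rowAsStr_spec : Claim_equal_rowAsStr := by
  intro boardRow _
  unfold Spec_rowAsStr
  apply String.toList_inj.mp
  rw [rowAsStr_alt, pvPiecesFrom_eq_pieces boardRow 0, List.drop_zero]
  have hjoin : (PySem.Str.join "" (pvPieces boardRow)).toList
      = PySem.Chars.join [] ((pvPieces boardRow).map String.toList) := by
    simp [PySem.Str.join]
  rw [hjoin, pieces_join_eq_mid, rowAsStr_eq_fold]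
  have := fold_eq_mid boardRow "" 0
  simpa using this
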